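-- pv_equiv track=rewrite | github.com/Mouminho/Competetive-Programming | world finals/ceiling function 2016/ceiling_function.py | Create_Tag
-- ===== SOURCE A (Python) =====
-- from typing import List, Tuple
--
-- def Create_Tag(tree: List[int]) -> str:
--     """function 'creat_Tag' to create a tag for the current tree,
--     it does that with the help of a modified tree walk algorithmus,
--     it construct a signature for the tree based on its structure."""
--     if not tree:
--         """check if tree = nil"""
--         return "X"
--     """if so then return 'X'"""
--     root_value = tree[0]
--     """otherwise set the root to be the first value in the list (tree)"""
--     left_subtree = [x for x in tree[1:] if x < root_value]
--     """if the current value is less than its parent then add it to 'left_subtree'"""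
--     right_subtree = [x for x in tree[1:] if x >= root_value]
--     """if the current value more or equal to its parent then add it 'right_subtree"""
--     left_signature = Create_Tag(left_subtree)
--     """create a signature for each node in the left subtree"""
--     right_signature = Create_Tag(right_subtree)
--     """create a signature for each node in the right subtree"""
--     return f"(N{left_signature}{right_signature})"
-- ===== SOURCE B (Python) =====
-- from typing import List
--
-- def Create_Tag(tree: List[int]) -> str:
--     """Build the BST incrementally (insert each value in order), then
--     serialize its shape -- instead of A's recursive partitioning."""
--     def insert(t, x):
--         if t is None:
--             return (x, None, None)
--         v, l, r = t
--         if x < v: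
--             return (v, insert(l, x), r)
--         return (v, l, insert(r, x))
--
--     t = None
--     for x in tree:
--         t = insert(t, x)
--
--     def ser(t):
--         if t is None:
--             return "X"
--         return "(N" + ser(t[1]) + ser(t[2]) + ")"
--
--     return ser(t)
-- ===== Notes on version B (the rewrite author's own statement) =====
-- stated objective: alternative
-- what changed: B builds the BST incrementally by inserting each value in order into an explicit tree and then serializes its shape, instead of A's recursive two-filter partitioning of the list at every level.
import Mathlib
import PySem

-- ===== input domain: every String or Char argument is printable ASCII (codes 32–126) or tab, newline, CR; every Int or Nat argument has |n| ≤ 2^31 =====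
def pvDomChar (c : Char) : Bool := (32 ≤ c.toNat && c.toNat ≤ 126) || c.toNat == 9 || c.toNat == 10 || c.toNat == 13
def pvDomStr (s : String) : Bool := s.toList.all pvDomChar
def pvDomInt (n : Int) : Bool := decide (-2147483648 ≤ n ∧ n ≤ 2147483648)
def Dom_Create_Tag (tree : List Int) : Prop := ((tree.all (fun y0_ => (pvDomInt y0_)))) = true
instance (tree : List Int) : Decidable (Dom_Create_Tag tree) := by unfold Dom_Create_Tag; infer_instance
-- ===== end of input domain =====

-- B builds the BST by inserting each value in order, then serializes the shape; A partitions recursively. Return values proved equal.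

-- ===== PORT A =====
-- A: recursive partition of the list around its head.
def Create_Tag (tree : List Int) : String :=
  match tree with
  | [] => "X"
  | root_value :: rest =>
    let left_subtree := rest.filter (fun x => decide (x < root_value))
    let right_subtree := rest.filter (fun x => decide (x ≥ root_value))
    "(N" ++ Create_Tag left_subtree ++ Create_Tag right_subtree ++ ")"
termination_by tree.length
decreasing_by
  · simpa using Nat.lt_succ_of_le (List.length_filter_le _ rest.attach)
  · simpa using Nat.lt_succ_of_le (List.length_filter_le _ rest.attach)

-- ===== PORT B =====
inductive BT : Type
  | leaf : BT
  | node : Int → BT → BT → BT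
deriving DecidableEq, Repr

def btInsert (t : BT) (x : Int) : BT :=
  match t with
  | BT.leaf => BT.node x BT.leaf BT.leaf
  | BT.node v l r =>
    if x < v then BT.node v (btInsert l x) r
    else BT.node v l (btInsert r x)

def btSer (t : BT) : String :=
  match t with
  | BT.leaf => "X"
  | BT.node _ l r => "(N" ++ btSer l ++ btSer r ++ ")"

def Create_Tag_alt (tree : List Int) : String :=
  btSer (tree.foldl btInsert BT.leaf)

-- ===== PRECONDITION & SPEC =====
def Spec_Create_Tag (tree : List Int) (out : String) : Prop := out = Create_Tag_alt tree
instance (tree : List Int) (out : String) : Decidable (Spec_Create_Tag tree out) := by unfold Spec_Create_Tag; infer_instance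

-- ===== CLAIM (what is proved, stated in full; the proofs are below) =====
def Claim_equal_Create_Tag : Prop := ∀ (tree : List Int), Dom_Create_Tag tree → Spec_Create_Tag tree (Create_Tag tree)

-- ===== LEMMAS AND PROOFS =====

-- Inserting a list into a node sends the small elements left and the rest right.
theorem foldl_insert_node (v : Int) (xs : List Int) : ∀ (l r : BT),
    xs.foldl btInsert (BT.node v l r) =
      BT.node v ((xs.filter (fun x => decide (x < v))).foldl btInsert l)
                ((xs.filter (fun x => decide (x ≥ v))).foldl btInsert r) := by
  induction xs with
  | nil => intro l r; simp
  | cons x xs ih =>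
    intro l r
    by_cases h : x < v
    · have h' : ¬ (x ≥ v) := by omega
      simp [List.foldl_cons, btInsert, h, h', ih]
    · have h' : x ≥ v := by omega
      simp [List.foldl_cons, btInsert, h, h', ih]

theorem create_tag_eq_alt (xs : List Int) :
    Create_Tag xs = Create_Tag_alt xs := by
  induction hL : xs.length using Nat.strong_induction_on generalizing xs with
  | _ n ih =>
    cases xs with
    | nil => simp [Create_Tag, Create_Tag_alt, btSer]
    | cons root rest =>
      have hl : (rest.filter (fun x => decide (x < root))).length < n := by
        subst hL; simpa using Nat.lt_succ_of_le (List.length_filter_le _ rest)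
      have hr : (rest.filter (fun x => decide (x ≥ root))).length < n := by
        subst hL; simpa using Nat.lt_succ_of_le (List.length_filter_le _ rest)
      rw [Create_Tag]
      rw [ih _ hl _ rfl, ih _ hr _ rfl]
      simp only [Create_Tag_alt, List.foldl_cons, btInsert, foldl_insert_node, btSer]

-- ===== VERDICT (by name: the statement is the Claim_ definition above) =====
theorem Create_Tag_spec : Claim_equal_Create_Tag := by
  intro tree _
  unfold Spec_Create_Tag
  exact create_tag_eq_alt tree
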